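-- pv_equiv track=rewrite | github.com/alesandu/Uni | Triennale/I/AE/hamming.py | calcola_sindrome
-- ===== SOURCE A (Python) =====
-- def calcola_sindrome(hex_string):
--     # Determina il numero di bit dalla lunghezza della stringa esadecimale
--     num_bits = len(hex_string) * 4
--     # Converte in binario e formatta per avere tutti i bit (inclusi gli zeri iniziali)
--     bin_string = bin(int(hex_string, 16))[2:].zfill(num_bits)
--
--     # Determina quanti bit di parità (r) servono (cioè coprono fino a num_bits)
--     r = 0
--     while (2 ** r) <= num_bits:
--         r += 1
--
--     syndrome_bits = []
--
--     # Calcola il bit di parità per ogni posizione potenza di 2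
--     # partendo dal più significativo fino al meno significativo (c8, c4, c2, c1...)
--     for i in range(r - 1, -1, -1):
--         pos = 2 ** i
--         parity = 0
--         for j in range(1, num_bits + 1):
--             # Controlla se il bit in posizione j (1-based da destra) appartiene a questo bit di parità
--             if (j & pos) != 0:
--                 # Prende il j-esimo bit partendo da destra
--                 bit_val = int(bin_string[-j])
--                 parity ^= bit_val
--         syndrome_bits.append(str(parity))
--
--     return "".join(syndrome_bits)
-- ===== SOURCE B (Python) =====
-- def calcola_sindrome(hex_string):
--     num_bits = len(hex_string) * 4
--     bin_string = bin(int(hex_string, 16))[2:].zfill(num_bits)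
--     r = 0
--     while (2 ** r) <= num_bits:
--         r += 1
--     # XOR of the (1-based, from the right) positions of all set bits:
--     # bit i of this accumulator IS the parity for position 2**i.
--     s = 0
--     for j in range(1, num_bits + 1):
--         if bin_string[-j] == '1':
--             s ^= j
--     return "".join('1' if (s >> i) & 1 else '0' for i in range(r - 1, -1, -1))
-- ===== Notes on version B (the rewrite author's own statement) =====
-- stated objective: faster
-- what changed: A recomputes a full parity pass over all num_bits data bits for each of the r syndrome positions; B makes one pass, XOR-ing together the 1-based positions of the set bits, and reads each syndrome bit off one bit of that single accumulator.
import Mathlib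
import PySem

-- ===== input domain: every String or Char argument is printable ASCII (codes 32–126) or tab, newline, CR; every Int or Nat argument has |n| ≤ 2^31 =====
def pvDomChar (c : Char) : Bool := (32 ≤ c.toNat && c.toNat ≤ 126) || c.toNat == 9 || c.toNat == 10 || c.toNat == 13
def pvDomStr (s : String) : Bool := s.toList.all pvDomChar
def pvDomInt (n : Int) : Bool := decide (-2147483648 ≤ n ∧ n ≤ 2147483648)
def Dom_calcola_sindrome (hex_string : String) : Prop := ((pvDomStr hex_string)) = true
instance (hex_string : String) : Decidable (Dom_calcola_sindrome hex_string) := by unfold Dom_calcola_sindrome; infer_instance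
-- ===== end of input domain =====

-- B replaces A's r×num_bits double loop (one parity pass per syndrome bit) by a single pass
-- XOR-ing the positions of the set data bits, then reading the syndrome off that accumulator's bits.

-- ===== PORT A =====
-- binary digits of m (bin(m) without the '0b' prefix, empty for 0); fuel-bounded halving loop,
-- fuel = m suffices since the argument strictly decreases
def pvBinNatAux : Nat → Nat → List Char
  | 0, _ => []
  | fuel + 1, m =>
    if m = 0 then []
    else pvBinNatAux fuel (m / 2) ++ [if m % 2 = 1 then '1' else '0']

-- bin(n)[2:] (for n < 0 Python leaves 'b' + digits after stripping '-0'; exact)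
def pvPyBin (n : Int) : List Char :=
  if n = 0 then ['0']
  else if n < 0 then 'b' :: pvBinNatAux n.natAbs n.natAbs
  else pvBinNatAux n.toNat n.toNat

-- str.zfill(w)
def pvZfill (cs : List Char) (w : Nat) : List Char :=
  List.replicate (w - cs.length) '0' ++ cs

-- the 'while (2 ** r) <= num_bits: r += 1' loop; fuel = num_bits + 1 suffices since r < 2 ** r
def pvWhileRAux : Nat → Nat → Nat → Nat
  | 0, _, r => r
  | fuel + 1, num_bits, r => if 2 ^ r ≤ num_bits then pvWhileRAux fuel num_bits (r + 1) else r

def calcola_sindrome (hex_string : String) : String :=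
  let num_bits : Nat := hex_string.toList.length * 4
  -- int(hex_string, 16); Pre_ excludes the ValueError case, so the default is unreached
  let n : Int := (PySem.Int.ofStrBase? hex_string 16).getD 0
  let bin_string : List Char := pvZfill (pvPyBin n) num_bits
  let r : Nat := pvWhileRAux (num_bits + 1) num_bits 0
  let syndrome_bits : List Char :=
    (PySem.List.pyRange ((r : Int) - 1) (-1) (-1)).foldl (fun acc i =>
      let pos : Int := (2 : Int) ^ i.toNat   -- 2 ** i; i ≥ 0 on this range
      let parity : Int :=
        (PySem.List.pyRange 1 ((num_bits : Int) + 1) 1).foldl (fun p j =>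
          if PySem.Int.band j pos ≠ 0 then
            -- int(bin_string[-j]); on Pre_ the char is a digit, so the default is unreached
            PySem.Int.bxor p ((PySem.Int.ofChars? [(PySem.List.pyGet? bin_string (-j)).getD '0']).getD 0)
          else p) 0
      acc ++ PySem.Int.toChars parity) []
  String.ofList syndrome_bits

-- ===== PORT B =====
def calcola_sindrome_alt (hex_string : String) : String :=
  let num_bits : Nat := hex_string.toList.length * 4
  let n : Int := (PySem.Int.ofStrBase? hex_string 16).getD 0
  let bin_string : List Char := pvZfill (pvPyBin n) num_bits
  let r : Nat := pvWhileRAux (num_bits + 1) num_bits 0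
  let s : Int :=
    (PySem.List.pyRange 1 ((num_bits : Int) + 1) 1).foldl (fun acc j =>
      if PySem.List.pyGet? bin_string (-j) = some '1' then PySem.Int.bxor acc j else acc) 0
  String.ofList ((PySem.List.pyRange ((r : Int) - 1) (-1) (-1)).map (fun i =>
      if PySem.Int.band (s >>> i.toNat) 1 = 1 then '1' else '0'))

-- ===== PRECONDITION & SPEC =====
-- Pre_ excludes exactly the inputs where Python A raises ValueError: strings that int(.,16)
-- rejects outright, and strings denoting a negative value (for those, non-digit characters
-- that bin() leaves in front of the binary digits reach int(bin_string[-j]), which raises).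
def Pre_calcola_sindrome (hex_string : String) : Prop :=
  0 ≤ (PySem.Int.ofStrBase? hex_string 16).getD (-1)
instance (hex_string : String) : Decidable (Pre_calcola_sindrome hex_string) := by
  unfold Pre_calcola_sindrome; infer_instance

def pvWitness_calcola_sindrome : String := "AF"

def Spec_calcola_sindrome (hex_string : String) (out : String) : Prop := out = calcola_sindrome_alt hex_string
instance (hex_string : String) (out : String) : Decidable (Spec_calcola_sindrome hex_string out) := by unfold Spec_calcola_sindrome; infer_instance

-- ===== CLAIM (what is proved, stated in full; the proofs are below) =====
def Claim_equal_calcola_sindrome : Prop := ∀ (hex_string : String), Dom_calcola_sindrome hex_string → Pre_calcola_sindrome hex_string → Spec_calcola_sindrome hex_string (calcola_sindrome hex_string)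

-- ===== LEMMAS AND PROOFS =====

-- bit i of x, as a Nat in {0,1}
lemma pv_bit (x i : Nat) : (x >>> i) &&& 1 = (x.testBit i).toNat := by
  rw [Nat.and_one_is_mod]
  rcases Nat.mod_two_eq_zero_or_one (x >>> i) with h | h <;>
    simp [Nat.testBit, Nat.one_and_eq_mod_two, h]

lemma pv_and_pow_ne (j i : Nat) : (j &&& 2 ^ i ≠ 0) ↔ j.testBit i = true := by
  rw [Nat.and_two_pow]
  cases h : j.testBit i <;> simp

-- the heart: A's parity fold for position 2^i reads off bit i of B's XOR-of-positions fold
lemma pv_core (g : Nat → Nat) (hg : ∀ j, g j = 0 ∨ g j = 1) (i : Nat) :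
    ∀ (M : List Nat) (p s : Nat), p = (s.testBit i).toNat →
      M.foldl (fun p j => if j &&& 2 ^ i ≠ 0 then p ^^^ g j else p) p
        = ((M.foldl (fun s j => if g j = 1 then s ^^^ j else s) s).testBit i).toNat := by
  intro M
  induction M with
  | nil => intro p s hp; simpa using hp
  | cons j M ih =>
    intro p s hp
    simp only [List.foldl_cons]
    rcases hg j with h0 | h1
    · rw [if_neg (by omega : ¬ g j = 1)]
      apply ih
      rw [hp]
      by_cases hj : j.testBit i = true
      · rw [if_pos ((pv_and_pow_ne j i).mpr hj), h0, Nat.xor_zero]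
      · rw [if_neg (fun hc => hj ((pv_and_pow_ne j i).mp hc))]
    · rw [if_pos h1]
      apply ih
      rw [hp, Nat.testBit_xor]
      by_cases hj : j.testBit i = true
      · rw [if_pos ((pv_and_pow_ne j i).mpr hj), h1, hj]
        cases hs : s.testBit i <;> rfl
      · rw [if_neg (fun hc => hj ((pv_and_pow_ne j i).mp hc))]
        cases hjv : j.testBit i
        · cases s.testBit i <;> rfl
        · exact absurd hjv hj

-- B's test 'bin_string[-j] == "1"' as a 0/1 value
def pvGN (bs : List Char) (m : Nat) : Nat :=
  if PySem.List.pyGet? bs (-(m : Int)) = some '1' then 1 else 0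

lemma pvGN_01 (bs : List Char) (m : Nat) : pvGN bs m = 0 ∨ pvGN bs m = 1 := by
  unfold pvGN; split <;> simp

-- A's 'int(bin_string[-j])' equals that 0/1 value when the string is made of '0'/'1'
lemma pv_gA (bs : List Char) (h01 : ∀ c ∈ bs, c = '0' ∨ c = '1') (m : Nat) :
    (PySem.Int.ofChars? [(PySem.List.pyGet? bs (-(m : Int))).getD '0']).getD 0
      = ((pvGN bs m : Nat) : Int) := by
  unfold pvGN
  cases hg : PySem.List.pyGet? bs (-(m : Int)) with
  | none => simp only [Option.getD_none, reduceCtorEq, if_false]; decide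
  | some c =>
    rcases h01 c (PySem.List.mem_of_pyGet?_eq_some bs hg) with rfl | rfl
    · simp only [Option.getD_some]
      rw [if_neg (by decide)]; decide
    · simp only [Option.getD_some]; decide

-- A's Int-valued parity fold is the cast of the Nat-valued one
lemma pv_castA (bs : List Char) (h01 : ∀ c ∈ bs, c = '0' ∨ c = '1') (e : Nat) :
    ∀ (M : List Nat) (p : Nat),
      (M.map (Nat.cast : Nat → Int)).foldl (fun p j =>
          if PySem.Int.band j ((2 : Int) ^ e) ≠ 0 then
            PySem.Int.bxor p ((PySem.Int.ofChars? [(PySem.List.pyGet? bs (-j)).getD '0']).getD 0)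
          else p) ((p : Nat) : Int)
        = ((M.foldl (fun p j => if j &&& 2 ^ e ≠ 0 then p ^^^ pvGN bs j else p) p : Nat) : Int) := by
  intro M
  induction M with
  | nil => intro p; rfl
  | cons m M ih =>
    intro p
    have hpow : (2 : Int) ^ e = ((2 ^ e : Nat) : Int) := by push_cast; ring
    simp only [List.map_cons, List.foldl_cons, hpow, PySem.Int.band_natCast]
    by_cases hc : m &&& 2 ^ e ≠ 0
    · rw [if_pos (by exact_mod_cast hc), if_pos hc, pv_gA bs h01 m, PySem.Int.bxor_natCast]
      exact ih _
    · rw [if_neg (by simpa using hc), if_neg hc]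
      exact ih _

-- B's Int-valued XOR-of-positions fold is the cast of the Nat-valued one
lemma pv_castB (bs : List Char) :
    ∀ (M : List Nat) (s : Nat),
      (M.map (Nat.cast : Nat → Int)).foldl (fun acc j =>
          if PySem.List.pyGet? bs (-j) = some '1' then PySem.Int.bxor acc j else acc) ((s : Nat) : Int)
        = ((M.foldl (fun s j => if pvGN bs j = 1 then s ^^^ j else s) s : Nat) : Int) := by
  intro M
  induction M with
  | nil => intro s; rfl
  | cons m M ih =>
    intro s
    simp only [List.map_cons, List.foldl_cons]
    by_cases hc : PySem.List.pyGet? bs (-(m : Int)) = some '1'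
    · rw [if_pos hc, if_pos (by unfold pvGN; rw [if_pos hc]), PySem.Int.bxor_natCast]
      exact ih _
    · rw [if_neg hc, if_neg (by unfold pvGN; rw [if_neg hc]; omega)]
      exact ih _

lemma pv_foldl_append_eq_map {α β : Type} (L : List α) (g : α → List β) (f : α → β)
    (h : ∀ x ∈ L, g x = [f x]) : ∀ acc, L.foldl (fun acc i => acc ++ g i) acc = acc ++ L.map f := by
  induction L with
  | nil => simp
  | cons x xs ih =>
    intro acc
    simp only [List.foldl_cons, List.map_cons]
    rw [h x (by simp), ih (fun y hy => h y (by simp [hy]))]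
    simp

-- the two syndrome computations agree for any '0'/'1' string
lemma pv_main (bs : List Char) (num_bits r : Nat) (h01 : ∀ c ∈ bs, c = '0' ∨ c = '1') :
    (PySem.List.pyRange ((r : Int) - 1) (-1) (-1)).foldl (fun acc i =>
        acc ++ PySem.Int.toChars
          ((PySem.List.pyRange 1 ((num_bits : Int) + 1) 1).foldl (fun p j =>
            if PySem.Int.band j ((2 : Int) ^ i.toNat) ≠ 0 then
              PySem.Int.bxor p ((PySem.Int.ofChars? [(PySem.List.pyGet? bs (-j)).getD '0']).getD 0)
            else p) 0)) []
      = (PySem.List.pyRange ((r : Int) - 1) (-1) (-1)).map (fun i =>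
          if PySem.Int.band
              (((PySem.List.pyRange 1 ((num_bits : Int) + 1) 1).foldl (fun acc j =>
                if PySem.List.pyGet? bs (-j) = some '1' then PySem.Int.bxor acc j else acc) 0) >>> ((i.toNat : Nat) : Int)) 1 = 1
          then '1' else '0') := by
  have houter : PySem.List.pyRange ((r : Int) - 1) (-1) (-1)
      = (List.range r).map (fun k => ((r - 1 - k : Nat) : Int)) := by
    rw [PySem.List.pyRange_neg_one]
    have hr : ((r : Int) - 1 - (-1)).toNat = r := by omega
    rw [hr]
    refine List.map_congr_left (fun k hk => ?_)
    have hk' : k < r := List.mem_range.mp hk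
    omega
  have hinner : PySem.List.pyRange 1 ((num_bits : Int) + 1) 1
      = ((List.range num_bits).map (fun k => k + 1)).map (Nat.cast : Nat → Int) := by
    rw [PySem.List.pyRange_one]
    have hnb : ((num_bits : Int) + 1 - 1).toNat = num_bits := by omega
    rw [hnb, List.map_map]
    refine List.map_congr_left (fun k _ => ?_)
    simp only [Function.comp_apply]
    push_cast
    ring
  set M : List Nat := (List.range num_bits).map (fun k => k + 1) with hM
  rw [houter, hinner]
  refine Eq.trans (pv_foldl_append_eq_map _ _ _ ?_ []) (List.nil_append _)
  intro x hx
  obtain ⟨k, hk, rfl⟩ := List.mem_map.mp hx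
  set e : Nat := (((r - 1 - k : Nat) : Int)).toNat with he
  have hA := pv_castA bs h01 e M 0
  have hB := pv_castB bs M 0
  simp only [Nat.cast_zero] at hA hB
  simp only [hA, hB]
  rw [pv_core (pvGN bs) (pvGN_01 bs) e M 0 0 (by simp)]
  have hsh : ((M.foldl (fun s j => if pvGN bs j = 1 then s ^^^ j else s) 0 : Nat) : Int) >>> ((e : Nat) : Int)
      = ((M.foldl (fun s j => if pvGN bs j = 1 then s ^^^ j else s) 0 >>> e : Nat) : Int) := by simp
  rw [hsh]
  rw [show (1 : Int) = ((1 : Nat) : Int) from rfl, PySem.Int.band_natCast, pv_bit]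
  cases hb : (M.foldl (fun s j => if pvGN bs j = 1 then s ^^^ j else s) 0).testBit e <;> decide

-- every character of A's bin_string is '0' or '1' (on Pre_: n ≥ 0)
lemma pvBinNatAux_chars (fuel : Nat) : ∀ (m : Nat), ∀ c ∈ pvBinNatAux fuel m, c = '0' ∨ c = '1' := by
  induction fuel with
  | zero => intro m c hc; simp [pvBinNatAux] at hc
  | succ fuel ih =>
    intro m c hc
    rw [pvBinNatAux] at hc
    by_cases h : m = 0
    · simp [h] at hc
    · rw [if_neg h] at hc
      rcases List.mem_append.mp hc with h1 | h2
      · exact ih (m / 2) c h1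
      · rcases List.mem_singleton.mp h2 with rfl
        split <;> simp

lemma pv_chars01 (n : Int) (hn : 0 ≤ n) (w : Nat) :
    ∀ c ∈ pvZfill (pvPyBin n) w, c = '0' ∨ c = '1' := by
  intro c hc
  rcases List.mem_append.mp hc with h1 | h2
  · left; exact List.eq_of_mem_replicate h1
  · unfold pvPyBin at h2
    by_cases h0 : n = 0
    · simp [h0] at h2; simp [h2]
    · rw [if_neg h0, if_neg (by omega)] at h2
      exact pvBinNatAux_chars n.toNat n.toNat c h2

-- ===== VERDICT (by name: the statement is the Claim_ definition above) =====
theorem calcola_sindrome_spec : Claim_equal_calcola_sindrome := by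
  intro s _ hpre
  unfold Pre_calcola_sindrome at hpre
  cases hn : PySem.Int.ofStrBase? s 16 with
  | none => rw [hn] at hpre; norm_num at hpre
  | some n =>
    rw [hn] at hpre
    simp only [Option.getD_some] at hpre
    unfold Spec_calcola_sindrome
    simp only [calcola_sindrome, calcola_sindrome_alt, hn, Option.getD_some]
    exact congrArg String.ofList
      (pv_main (pvZfill (pvPyBin n) (s.toList.length * 4)) (s.toList.length * 4)
        (pvWhileRAux (s.toList.length * 4 + 1) (s.toList.length * 4) 0) (pv_chars01 n hpre _))
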